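-- pv_equiv track=rewrite | github.com/HarshilChaudhari/Rubiks-Cube | renderer.py | _get_cubelets_in_layer
-- ===== SOURCE A (Python) =====
-- def _get_cubelets_in_layer(face_char):
--     layer_indices = []
--     cubelet_index = 0
--     for x_grid in range(3):
--         for y_grid in range(3):
--             for z_grid in range(3):
--                 if face_char == 'U' and y_grid == 2: layer_indices.append(cubelet_index)
--                 elif face_char == 'D' and y_grid == 0: layer_indices.append(cubelet_index)
--                 elif face_char == 'F' and z_grid == 2: layer_indices.append(cubelet_index)
--                 elif face_char == 'B' and z_grid == 0: layer_indices.append(cubelet_index)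
--                 elif face_char == 'L' and x_grid == 0: layer_indices.append(cubelet_index)
--                 elif face_char == 'R' and x_grid == 2: layer_indices.append(cubelet_index)
--                 cubelet_index += 1
--     return layer_indices
-- ===== SOURCE B (Python) =====
-- def _get_cubelets_in_layer(face_char):
--     axes = {'U': (1, 2), 'D': (1, 0), 'F': (2, 2), 'B': (2, 0), 'L': (0, 0), 'R': (0, 2)}
--     if face_char not in axes:
--         return []
--     axis, fixed = axes[face_char]
--     if axis == 0:
--         return [fixed * 9 + y * 3 + z for y in range(3) for z in range(3)]
--     if axis == 1:
--         return [x * 9 + fixed * 3 + z for x in range(3) for z in range(3)]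
--     return [x * 9 + y * 3 + fixed for x in range(3) for y in range(3)]
-- ===== Notes on version B (the rewrite author's own statement) =====
-- stated objective: simpler
-- what changed: Replaces the 27-cell triple-nested counter scan with six chained conditions by a face->(axis,fixed) lookup table and a direct 9-cell traversal of the selected plane, computing each cubelet index in closed form as x*9+y*3+z.
import Mathlib
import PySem

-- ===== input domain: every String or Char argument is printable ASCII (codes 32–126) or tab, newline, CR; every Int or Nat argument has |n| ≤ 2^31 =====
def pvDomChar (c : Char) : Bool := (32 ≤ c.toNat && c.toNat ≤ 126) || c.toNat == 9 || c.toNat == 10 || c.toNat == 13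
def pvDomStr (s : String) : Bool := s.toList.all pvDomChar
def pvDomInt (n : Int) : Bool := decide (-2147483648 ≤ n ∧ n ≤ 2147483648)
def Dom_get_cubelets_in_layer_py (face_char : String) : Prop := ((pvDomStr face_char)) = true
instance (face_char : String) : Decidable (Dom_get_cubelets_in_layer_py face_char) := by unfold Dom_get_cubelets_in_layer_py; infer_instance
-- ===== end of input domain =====

-- B replaces the 27-cell counter scan with a face→(axis, fixed-coordinate) table and builds
-- the 9 plane indices arithmetically (simpler decomposition; no speed claim).

-- ===== PORT A =====
-- literal transliteration: triple loop over range(3), accumulator (layer_indices, cubelet_index)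
def get_cubelets_in_layer_py (face_char : String) : List Int :=
  let res : List Int × Int :=
    (PySem.List.pyRange 0 3 1).foldl (fun s x_grid =>
      (PySem.List.pyRange 0 3 1).foldl (fun s y_grid =>
        (PySem.List.pyRange 0 3 1).foldl (fun s z_grid =>
          let li : List Int :=
            if face_char == "U" && y_grid == 2 then s.1 ++ [s.2]
            else if face_char == "D" && y_grid == 0 then s.1 ++ [s.2]
            else if face_char == "F" && z_grid == 2 then s.1 ++ [s.2]
            else if face_char == "B" && z_grid == 0 then s.1 ++ [s.2]
            else if face_char == "L" && x_grid == 0 then s.1 ++ [s.2]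
            else if face_char == "R" && x_grid == 2 then s.1 ++ [s.2]
            else s.1
          (li, s.2 + 1)) s) s) (([] : List Int), (0 : Int))
  res.1

-- ===== PORT B =====
-- table lookup + closed-form index x*9 + y*3 + z over the 9 cells of the selected plane
def get_cubelets_in_layer_py_alt (face_char : String) : List Int :=
  let axes : PySem.Dict String (Int × Int) :=
    PySem.Dict.ofList [("U", (1, 2)), ("D", (1, 0)), ("F", (2, 2)),
                       ("B", (2, 0)), ("L", (0, 0)), ("R", (0, 2))]
  match axes.get? face_char with
  | none => []
  | some (axis, fixed) =>
    if axis = 0 then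
      (PySem.List.pyRange 0 3 1).flatMap (fun y =>
        (PySem.List.pyRange 0 3 1).map (fun z => fixed * 9 + y * 3 + z))
    else if axis = 1 then
      (PySem.List.pyRange 0 3 1).flatMap (fun x =>
        (PySem.List.pyRange 0 3 1).map (fun z => x * 9 + fixed * 3 + z))
    else
      (PySem.List.pyRange 0 3 1).flatMap (fun x =>
        (PySem.List.pyRange 0 3 1).map (fun y => x * 9 + y * 3 + fixed))

-- ===== PRECONDITION & SPEC =====
def Spec_get_cubelets_in_layer_py (face_char : String) (out : List Int) : Prop := out = get_cubelets_in_layer_py_alt face_char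
instance (face_char : String) (out : List Int) : Decidable (Spec_get_cubelets_in_layer_py face_char out) := by unfold Spec_get_cubelets_in_layer_py; infer_instance

-- ===== CLAIM (what is proved, stated in full; the proofs are below) =====
def Claim_equal_get_cubelets_in_layer_py : Prop := ∀ (face_char : String), Dom_get_cubelets_in_layer_py face_char → Spec_get_cubelets_in_layer_py face_char (get_cubelets_in_layer_py face_char)

-- ===== LEMMAS AND PROOFS =====
theorem pv_other (face_char : String)
    (hU : face_char ≠ "U") (hD : face_char ≠ "D") (hF : face_char ≠ "F")
    (hB : face_char ≠ "B") (hL : face_char ≠ "L") (hR : face_char ≠ "R") :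
    get_cubelets_in_layer_py face_char = get_cubelets_in_layer_py_alt face_char := by
  have eU : ("U" == face_char) = false := beq_eq_false_iff_ne.mpr (Ne.symm hU)
  have eD : ("D" == face_char) = false := beq_eq_false_iff_ne.mpr (Ne.symm hD)
  have eF : ("F" == face_char) = false := beq_eq_false_iff_ne.mpr (Ne.symm hF)
  have eB : ("B" == face_char) = false := beq_eq_false_iff_ne.mpr (Ne.symm hB)
  have eL : ("L" == face_char) = false := beq_eq_false_iff_ne.mpr (Ne.symm hL)
  have eR : ("R" == face_char) = false := beq_eq_false_iff_ne.mpr (Ne.symm hR)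
  simp [get_cubelets_in_layer_py, get_cubelets_in_layer_py_alt,
    PySem.List.pyRange, PySem.Dict.get?, PySem.Dict.ofList, PySem.Dict.update,
    PySem.Dict.empty, PySem.Dict.insert, List.range_succ, List.find?,
    beq_iff_eq, hU, hD, hF, hB, hL, hR, eU, eD, eF, eB, eL, eR]

-- ===== VERDICT (by name: the statement is the Claim_ definition above) =====
theorem get_cubelets_in_layer_py_spec : Claim_equal_get_cubelets_in_layer_py := by
  intro face_char _
  unfold Spec_get_cubelets_in_layer_py
  by_cases hU : face_char = "U"; · subst hU; decide
  by_cases hD : face_char = "D"; · subst hD; decide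
  by_cases hF : face_char = "F"; · subst hF; decide
  by_cases hB : face_char = "B"; · subst hB; decide
  by_cases hL : face_char = "L"; · subst hL; decide
  by_cases hR : face_char = "R"; · subst hR; decide
  exact pv_other face_char hU hD hF hB hL hR
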